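-- pv_equiv track=rewrite | github.com/s-koide-dc/Design2Code | src/code_generation/project_generator.py | _extract_ops_from_core
-- ===== SOURCE A (Python) =====
-- def _extract_ops_from_core(core_logic: list) -> list:
--     ops = []
--     for line in core_logic or []:
--         text = str(line)
--         if "[ops:" not in text.lower():
--             continue
--         start = text.lower().find("[ops:")
--         end = text.find("]", start)
--         if start == -1 or end == -1:
--             continue
--         raw = text[start + 5:end]
--         parts = [p.strip() for p in raw.split(",") if p.strip()]
--         ops.extend([p.lower() for p in parts])
--     return ops
-- ===== SOURCE B (Python) =====
-- def _extract_ops_from_core(core_logic: list) -> list: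
--     # Single character-level pass per line with an explicit matching automaton:
--     # no find/slice/split library scans.
--     ops = []
--     pat = "[ops:"
--     for line in core_logic or []:
--         found = []
--         buf = []
--         m = 0            # marker-match progress; m == 5 means inside the body
--         closed = False
--         for ch in str(line).lower():
--             if m < 5:
--                 if ch == pat[m]:
--                     m += 1
--                 elif ch == "[":
--                     m = 1
--                 else:
--                     m = 0
--             elif ch == "]":
--                 closed = True
--                 break
--             elif ch == ",":
--                 found.append("".join(buf))
--                 buf = []
--             else:
--                 buf.append(ch)
--         if closed:
--             found.append("".join(buf))
--             ops.extend(t for t in (p.strip() for p in found) if t)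
--     return ops
-- ===== Notes on version B (the rewrite author's own statement) =====
-- stated objective: alternative
-- what changed: B replaces A's staged library scans (find the marker, find the closing bracket, slice, split on commas, strip/lower each part) with a single character-level pass per line driven by an explicit matching automaton that tracks marker progress and flushes comma-separated tokens on the fly.
import Mathlib
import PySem

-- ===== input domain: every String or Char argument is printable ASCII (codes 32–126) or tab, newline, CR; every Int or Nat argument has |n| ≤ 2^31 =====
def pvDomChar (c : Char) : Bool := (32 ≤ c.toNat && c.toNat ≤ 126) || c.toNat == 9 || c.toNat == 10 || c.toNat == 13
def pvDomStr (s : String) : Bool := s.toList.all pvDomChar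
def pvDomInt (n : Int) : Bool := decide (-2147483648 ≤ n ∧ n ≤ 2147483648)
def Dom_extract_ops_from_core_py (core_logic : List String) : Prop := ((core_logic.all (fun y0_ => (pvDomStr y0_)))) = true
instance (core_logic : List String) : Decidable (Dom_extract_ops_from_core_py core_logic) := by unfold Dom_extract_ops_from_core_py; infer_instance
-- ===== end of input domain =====

-- B replaces A's staged library scans (find marker, find ']', slice, split, strip/lower)
-- with one character-level pass per line driven by an explicit matching automaton (objective: alternative).

-- ===== PORT A =====
-- loop body of A's 'for line in core_logic or []'
def pvStepA (ops : List String) (line : String) : List String :=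
  let text := line.toList
  if PySem.Chars.isIn "[ops:".toList (PySem.Chars.lower text) = false then ops
  else
    let start := PySem.Chars.find (PySem.Chars.lower text) "[ops:".toList
    let stop := PySem.Chars.findFrom text "]".toList start
    if start = -1 ∨ stop = -1 then ops
    else
      let raw := PySem.List.slice text (some (start + 5)) (some stop)
      let parts := ((PySem.Chars.splitOn raw ",".toList).map PySem.Chars.strip).filter
        (fun p => !p.isEmpty)
      ops ++ parts.map (fun p => String.mk (PySem.Chars.lower p))

def extract_ops_from_core_py (core_logic : List String) : List String :=
  core_logic.foldl pvStepA []

-- ===== PORT B =====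
-- the inner 'for ch in str(line).lower()' loop of B: state (m, buf, found);
-- returns (found, buf, closed) exactly as the Python loop leaves them (break at ']')
def pvScanB (pat : List Char) : Nat → List Char → List (List Char) → List Char →
    List (List Char) × List Char × Bool
  | _, buf, found, [] => (found, buf, false)
  | m, buf, found, ch :: rest =>
    if m < 5 then
      if ch = pat.getD m ' ' then pvScanB pat (m + 1) buf found rest
      else if ch = '[' then pvScanB pat 1 buf found rest
      else pvScanB pat 0 buf found rest
    else if ch = ']' then (found, buf, true)
    else if ch = ',' then pvScanB pat m [] (found ++ [buf]) rest
    else pvScanB pat m (buf ++ [ch]) found rest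

-- loop body of B's 'for line in core_logic or []'
def pvStepB (ops : List String) (line : String) : List String :=
  let r := pvScanB "[ops:".toList 0 [] [] (PySem.Chars.lower line.toList)
  if r.2.2 then
    ops ++ (((r.1 ++ [r.2.1]).map PySem.Chars.strip).filter (fun p => !p.isEmpty)).map String.mk
  else ops

def extract_ops_from_core_py_alt (core_logic : List String) : List String :=
  core_logic.foldl pvStepB []

-- ===== PRECONDITION & SPEC =====
def Spec_extract_ops_from_core_py (core_logic : List String) (out : List String) : Prop := out = extract_ops_from_core_py_alt core_logic
instance (core_logic : List String) (out : List String) : Decidable (Spec_extract_ops_from_core_py core_logic out) := by unfold Spec_extract_ops_from_core_py; infer_instance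

-- ===== CLAIM (what is proved, stated in full; the proofs are below) =====
def Claim_equal_extract_ops_from_core_py : Prop := ∀ (core_logic : List String), Dom_extract_ops_from_core_py core_logic → Spec_extract_ops_from_core_py core_logic (extract_ops_from_core_py core_logic)

-- ===== LEMMAS AND PROOFS =====

theorem upper_toNat_bounds (c : Char) (h : PySem.Chars.isupper c = true) :
    65 ≤ c.toNat ∧ c.toNat ≤ 90 := by
  simp [PySem.Chars.isupper] at h
  exact ⟨Fin.mk_le_mk.mp h.1, Fin.mk_le_mk.mp h.2⟩

theorem lowerChar_toNat_of_upper (c : Char) (h : PySem.Chars.isupper c = true) :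
    (PySem.Chars.lowerChar c).toNat = c.toNat + 32 := by
  have hb := upper_toNat_bounds c h
  have hv : Nat.isValidChar (c.toNat + 32) := by left; omega
  rw [PySem.Chars.lowerChar, if_pos h, Char.toNat_ofNat, if_pos hv]

theorem lowerChar_eq_iff (c x : Char) (hx1 : ¬ (97 ≤ x.toNat ∧ x.toNat ≤ 122))
    (hx2 : ¬ (65 ≤ x.toNat ∧ x.toNat ≤ 90)) :
    (PySem.Chars.lowerChar c = x) ↔ c = x := by
  by_cases h : PySem.Chars.isupper c = true
  · have hb := upper_toNat_bounds c h
    have h1 := lowerChar_toNat_of_upper c h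
    constructor
    · intro he; exfalso; apply hx1; rw [← he, h1]; omega
    · intro he; exfalso; apply hx2; rw [← he]; omega
  · simp [PySem.Chars.lowerChar, h]

theorem isspace_lowerChar (c : Char) :
    PySem.Chars.isspace (PySem.Chars.lowerChar c) = PySem.Chars.isspace c := by
  by_cases h : PySem.Chars.isupper c = true
  · have hb := upper_toNat_bounds c h
    have h1 := lowerChar_toNat_of_upper c h
    have hA : PySem.Chars.isspace (PySem.Chars.lowerChar c) = false := by
      simp [PySem.Chars.isspace, h1]; omega
    have hB : PySem.Chars.isspace c = false := by
      simp [PySem.Chars.isspace]; omega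
    rw [hA, hB]
  · simp [PySem.Chars.lowerChar, h]

theorem findgo_shift (c : Char) (l : List Char) (k : Nat) :
    PySem.Chars.find.go [c] l k =
      if PySem.Chars.find.go [c] l 0 = -1 then -1 else (k : Int) + PySem.Chars.find.go [c] l 0 := by
  induction l generalizing k with
  | nil => simp [PySem.Chars.find.go]
  | cons a t ih =>
    by_cases hp : [c].isPrefixOf (a :: t) = true
    · simp [PySem.Chars.find.go, hp]
    · have hr : -1 ≤ PySem.Chars.find.go [c] t 0 := PySem.Chars.neg_one_le_find t [c]
      simp only [PySem.Chars.find.go, hp]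
      rw [ih (k+1), ih 1]
      by_cases h0 : PySem.Chars.find.go [c] t 0 = -1
      · simp [h0]
      · simp [h0]
        omega

theorem findgo_map_lower (c : Char) (hc : ∀ x, (PySem.Chars.lowerChar x = c) ↔ x = c)
    (l : List Char) (k : Nat) :
    PySem.Chars.find.go [c] (l.map PySem.Chars.lowerChar) k = PySem.Chars.find.go [c] l k := by
  induction l generalizing k with
  | nil => simp [PySem.Chars.find.go]
  | cons a t ih =>
    have hbeq : (c == PySem.Chars.lowerChar a) = (c == a) := by
      by_cases h : a = c
      · rw [h, (hc c).mpr rfl]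
      · have h2 : ¬ PySem.Chars.lowerChar a = c := fun he => h ((hc a).mp he)
        rw [Bool.eq_iff_iff]
        simp only [beq_iff_eq]
        constructor
        · intro he; exact absurd he.symm h2
        · intro he; exact absurd he.symm h
    have hpf : [c].isPrefixOf (PySem.Chars.lowerChar a :: t.map PySem.Chars.lowerChar)
        = [c].isPrefixOf (a :: t) := by
      have h1 : [c].isPrefixOf (PySem.Chars.lowerChar a :: t.map PySem.Chars.lowerChar)
          = (c == PySem.Chars.lowerChar a) := by simp [List.isPrefixOf]
      have h2 : [c].isPrefixOf (a :: t) = (c == a) := by simp [List.isPrefixOf]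
      rw [h1, h2, hbeq]
    by_cases hp : [c].isPrefixOf (a :: t) = true
    · simp only [List.map_cons, PySem.Chars.find.go, hpf, hp, if_pos]
    · simp only [List.map_cons, PySem.Chars.find.go, hpf, hp, Bool.false_eq_true, if_neg,
        not_false_iff]
      exact ih (k+1)

theorem find_map_lower (c : Char) (hc : ∀ x, (PySem.Chars.lowerChar x = c) ↔ x = c) (l : List Char) :
    PySem.Chars.find (l.map PySem.Chars.lowerChar) [c] = PySem.Chars.find l [c] :=
  findgo_map_lower c hc l 0

theorem find_single_cons (a : Char) (t : List Char) (c : Char) (h : ¬ a = c) :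
    PySem.Chars.find (a :: t) [c] =
      if PySem.Chars.find t [c] = -1 then -1 else 1 + PySem.Chars.find t [c] := by
  have hp : [c].isPrefixOf (a :: t) = false := by
    simp [List.isPrefixOf]; intro h'; exact absurd h'.symm h
  rw [PySem.Chars.find, PySem.Chars.find.go]
  simp only [hp, Bool.false_eq_true, if_neg, not_false_iff]
  rw [findgo_shift]
  have : PySem.Chars.find t [c] = PySem.Chars.find.go [c] t 0 := rfl
  rw [this]
  norm_num

theorem find_single_append (pre l : List Char) (c : Char) (h : c ∉ pre) :
    PySem.Chars.find (pre ++ l) [c] =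
      if PySem.Chars.find l [c] = -1 then -1 else (pre.length : Int) + PySem.Chars.find l [c] := by
  induction pre with
  | nil =>
    simp only [List.nil_append, List.length_nil, Nat.cast_zero, zero_add]
    split_ifs with h0
    · rw [h0]
    · rfl
  | cons a t ih =>
    have ha : ¬ a = c := by intro he; exact h (by simp [he])
    have ht : c ∉ t := fun hm => h (List.mem_cons_of_mem _ hm)
    rw [List.cons_append, find_single_cons a _ c ha, ih ht]
    have hr : -1 ≤ PySem.Chars.find l [c] := PySem.Chars.neg_one_le_find l [c]
    by_cases h0 : PySem.Chars.find l [c] = -1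
    · simp [h0]
    · simp [h0]
      omega

theorem beq_lowerChar (c a : Char) (hc : ∀ x, (PySem.Chars.lowerChar x = c) ↔ x = c) :
    (c == PySem.Chars.lowerChar a) = (c == a) := by
  by_cases h : a = c
  · rw [h, (hc c).mpr rfl]
  · have h2 : ¬ PySem.Chars.lowerChar a = c := fun he => h ((hc a).mp he)
    rw [Bool.eq_iff_iff]
    simp only [beq_iff_eq]
    constructor
    · intro he; exact absurd he.symm h2
    · intro he; exact absurd he.symm h

theorem splitOn_go_map_lower (c : Char) (hc : ∀ x, (PySem.Chars.lowerChar x = c) ↔ x = c)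
    (fuel : Nat) :
    ∀ (l cur : List Char) (acc : List (List Char)),
      PySem.Chars.splitOn.go [c] fuel (l.map PySem.Chars.lowerChar)
          (cur.map PySem.Chars.lowerChar) (acc.map (List.map PySem.Chars.lowerChar)) =
        (PySem.Chars.splitOn.go [c] fuel l cur acc).map (List.map PySem.Chars.lowerChar) := by
  induction fuel with
  | zero =>
    intro l cur acc
    simp [PySem.Chars.splitOn.go]
  | succ f ih =>
    intro l cur acc
    cases l with
    | nil => simp [PySem.Chars.splitOn.go]
    | cons a t =>
      have hpf : [c].isPrefixOf (PySem.Chars.lowerChar a :: t.map PySem.Chars.lowerChar)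
          = [c].isPrefixOf (a :: t) := by
        have h1 : [c].isPrefixOf (PySem.Chars.lowerChar a :: t.map PySem.Chars.lowerChar)
            = (c == PySem.Chars.lowerChar a) := by simp [List.isPrefixOf]
        have h2 : [c].isPrefixOf (a :: t) = (c == a) := by simp [List.isPrefixOf]
        rw [h1, h2, beq_lowerChar c a hc]
      by_cases hp : [c].isPrefixOf (a :: t) = true
      · simp only [List.map_cons, PySem.Chars.splitOn.go, hpf, hp, if_pos]
        have hd : List.drop [c].length (PySem.Chars.lowerChar a :: t.map PySem.Chars.lowerChar)
            = (List.drop [c].length (a :: t)).map PySem.Chars.lowerChar := by simp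
        rw [hd]
        have := ih (List.drop [c].length (a :: t)) [] (cur.reverse :: acc)
        simpa using this
      · simp only [List.map_cons, PySem.Chars.splitOn.go, hpf, hp, Bool.false_eq_true, if_neg,
          not_false_iff]
        exact ih t (a :: cur) acc

theorem splitOn_map_lower (c : Char) (hc : ∀ x, (PySem.Chars.lowerChar x = c) ↔ x = c)
    (l : List Char) :
    PySem.Chars.splitOn (l.map PySem.Chars.lowerChar) [c] =
      (PySem.Chars.splitOn l [c]).map (List.map PySem.Chars.lowerChar) := by
  rw [PySem.Chars.splitOn, PySem.Chars.splitOn, List.length_map]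
  have := splitOn_go_map_lower c hc (l.length + 1) l [] []
  simpa using this

theorem strip_map_lower (l : List Char) :
    PySem.Chars.strip (l.map PySem.Chars.lowerChar) =
      (PySem.Chars.strip l).map PySem.Chars.lowerChar := by
  have hsp : (PySem.Chars.isspace ∘ PySem.Chars.lowerChar) = PySem.Chars.isspace :=
    funext isspace_lowerChar
  simp [PySem.Chars.strip, PySem.Chars.lstrip, PySem.Chars.rstrip, List.dropWhile_map,
    ← List.map_reverse, hsp]

theorem tail_lists_eq_aux (X : List (List Char)) :
    List.map (fun p => String.mk (PySem.Chars.lower p))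
      (List.filter (fun p => !p.isEmpty) (List.map PySem.Chars.strip X)) =
    List.map String.mk (List.filter (fun p => !p.isEmpty)
      (List.map PySem.Chars.strip (List.map (List.map PySem.Chars.lowerChar) X))) := by
  induction X with
  | nil => rfl
  | cons x xs ih =>
    simp only [List.map_cons, List.filter_cons, strip_map_lower x]
    have he : ((PySem.Chars.strip x).map PySem.Chars.lowerChar).isEmpty = (PySem.Chars.strip x).isEmpty := by
      cases PySem.Chars.strip x <;> rfl
    rw [he]
    by_cases hP : ((PySem.Chars.strip x).isEmpty : Bool) = true
    · simp only [hP]; simpa using ih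
    · have hP' : (!(PySem.Chars.strip x).isEmpty) = true := by simp [hP]
      simp only [hP', if_pos, List.map_cons]
      rw [ih]
      rfl

theorem tail_lists_eq (raw : List Char) :
    List.map (fun p => String.mk (PySem.Chars.lower p))
      (List.filter (fun p => !p.isEmpty) (List.map PySem.Chars.strip (PySem.Chars.splitOn raw [',']))) =
    List.map String.mk (List.filter (fun p => !p.isEmpty)
      (List.map PySem.Chars.strip (PySem.Chars.splitOn (raw.map PySem.Chars.lowerChar) [',']))) := by
  have hcC : ∀ x, (PySem.Chars.lowerChar x = ',') ↔ x = ',' :=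
    fun x => lowerChar_eq_iff x ',' (by decide) (by decide)
  rw [splitOn_map_lower ',' hcC raw]
  exact tail_lists_eq_aux _

-- ---- automaton lemmas (B side) ----

-- comma-splitting model of the m = 5 phase: (completed segments, current buffer)
def pvSegs (buf : List Char) : List Char → List (List Char) × List Char
  | [] => ([], buf)
  | c :: r => if c = ',' then ((pvSegs [] r).1.cons buf, (pvSegs [] r).2)
              else pvSegs (buf ++ [c]) r

theorem scan4_eq (u buf : List Char) (found : List (List Char)) (h : ¬ [':'] <+: u) :
    pvScanB ['[','o','p','s',':'] 4 buf found u = pvScanB ['[','o','p','s',':'] 0 buf found u := by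
  cases u with
  | nil => rfl
  | cons c r =>
    have hc : ¬ c = ':' := by intro he; exact h (by simp [he])
    simp only [pvScanB, List.getD]
    by_cases hb : c = '['
    · simp [hb]
    · simp [hc, hb]

theorem scan3_eq (u buf : List Char) (found : List (List Char)) (h : ¬ ['s',':'] <+: u) :
    pvScanB ['[','o','p','s',':'] 3 buf found u = pvScanB ['[','o','p','s',':'] 0 buf found u := by
  cases u with
  | nil => rfl
  | cons c r =>
    by_cases hc : c = 's'
    · subst hc
      have h' : ¬ [':'] <+: r := by intro he; exact h (List.cons_prefix_cons.mpr ⟨rfl, he⟩)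
      simp only [pvScanB, List.getD]
      norm_num
      exact scan4_eq r buf found h'
    · simp only [pvScanB, List.getD]
      by_cases hb : c = '['
      · simp [hb]
      · simp [hc, hb]

theorem scan2_eq (u buf : List Char) (found : List (List Char)) (h : ¬ ['p','s',':'] <+: u) :
    pvScanB ['[','o','p','s',':'] 2 buf found u = pvScanB ['[','o','p','s',':'] 0 buf found u := by
  cases u with
  | nil => rfl
  | cons c r =>
    by_cases hc : c = 'p'
    · subst hc
      have h' : ¬ ['s',':'] <+: r := by intro he; exact h (List.cons_prefix_cons.mpr ⟨rfl, he⟩)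
      simp only [pvScanB, List.getD]
      norm_num
      exact scan3_eq r buf found h'
    · simp only [pvScanB, List.getD]
      by_cases hb : c = '['
      · simp [hb]
      · simp [hc, hb]

theorem scan1_eq (u buf : List Char) (found : List (List Char)) (h : ¬ ['o','p','s',':'] <+: u) :
    pvScanB ['[','o','p','s',':'] 1 buf found u = pvScanB ['[','o','p','s',':'] 0 buf found u := by
  cases u with
  | nil => rfl
  | cons c r =>
    by_cases hc : c = 'o'
    · subst hc
      have h' : ¬ ['p','s',':'] <+: r := by intro he; exact h (List.cons_prefix_cons.mpr ⟨rfl, he⟩)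
      simp only [pvScanB, List.getD]
      norm_num
      exact scan2_eq r buf found h'
    · simp only [pvScanB, List.getD]
      by_cases hb : c = '['
      · simp [hb]
      · simp [hc, hb]

theorem scan_shift (a : Char) (u buf : List Char) (found : List (List Char))
    (h : ¬ ['[','o','p','s',':'] <+: (a :: u)) :
    pvScanB ['[','o','p','s',':'] 0 buf found (a :: u) =
      pvScanB ['[','o','p','s',':'] 0 buf found u := by
  by_cases hb : a = '['
  · subst hb
    have h' : ¬ ['o','p','s',':'] <+: u := by intro he; exact h (List.cons_prefix_cons.mpr ⟨rfl, he⟩)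
    simp only [pvScanB, List.getD]
    norm_num
    exact scan1_eq u buf found h'
  · simp [pvScanB, List.getD, hb]

theorem scan_prefix_step (v buf : List Char) (found : List (List Char)) :
    pvScanB ['[','o','p','s',':'] 0 buf found (['[','o','p','s',':'] ++ v) =
      pvScanB ['[','o','p','s',':'] 5 buf found v := rfl

theorem scan_no_marker (u buf : List Char) (found : List (List Char))
    (h : ¬ ['[','o','p','s',':'] <:+: u) :
    pvScanB ['[','o','p','s',':'] 0 buf found u = (found, buf, false) := by
  induction u with
  | nil => rfl
  | cons a r ih =>
    have h1 : ¬ ['[','o','p','s',':'] <+: (a :: r) := fun hp => h hp.isInfix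
    have h2 : ¬ ['[','o','p','s',':'] <:+: r := by
      intro hi
      exact h (hi.trans (List.suffix_cons a r).isInfix)
    rw [scan_shift a r buf found h1]
    exact ih h2

theorem scan_search (k : Nat) (u buf : List Char) (found : List (List Char))
    (hmin : ∀ i < k, ¬ ['[','o','p','s',':'] <+: u.drop i)
    (hk : ['[','o','p','s',':'] <+: u.drop k) :
    pvScanB ['[','o','p','s',':'] 0 buf found u =
      pvScanB ['[','o','p','s',':'] 5 buf found (u.drop (k + 5)) := by
  induction k generalizing u with
  | zero =>
    obtain ⟨v, hv⟩ := hk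
    simp only [List.drop_zero] at hv
    rw [← hv]
    have hdv : (['[','o','p','s',':'] ++ v).drop (0 + 5) = v := by simp
    rw [hdv]
    exact scan_prefix_step v buf found
  | succ k ih =>
    cases u with
    | nil => simp at hk
    | cons a r =>
      have h0 : ¬ ['[','o','p','s',':'] <+: (a :: r) := by
        have := hmin 0 (Nat.succ_pos k)
        simpa using this
      rw [scan_shift a r buf found h0]
      have hmin' : ∀ i < k, ¬ ['[','o','p','s',':'] <+: r.drop i := by
        intro i hi
        have := hmin (i + 1) (by omega)
        simpa using this
      have hk' : ['[','o','p','s',':'] <+: r.drop k := by simpa using hk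
      have := ih r hmin' hk'
      simpa using this

theorem scan_collect_no_close (u buf : List Char) (found : List (List Char)) (h : ']' ∉ u) :
    (pvScanB ['[','o','p','s',':'] 5 buf found u).2.2 = false := by
  induction u generalizing buf found with
  | nil => rfl
  | cons c r ih =>
    have hc : ¬ c = ']' := fun he => h (by simp [he])
    have hr : ']' ∉ r := fun hm => h (List.mem_cons_of_mem _ hm)
    by_cases hcm : c = ','
    · simp only [pvScanB, hcm]
      norm_num
      exact ih [] (found ++ [buf]) hr
    · simp only [pvScanB, hc, hcm]
      norm_num
      exact ih (buf ++ [c]) found hr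

theorem scan_collect (v : List Char) (hv : ']' ∉ v) :
    ∀ (w buf : List Char) (found : List (List Char)),
      pvScanB ['[','o','p','s',':'] 5 buf found (v ++ ']' :: w) =
        (found ++ (pvSegs buf v).1, (pvSegs buf v).2, true) := by
  induction v with
  | nil =>
    intro w buf found
    simp [pvScanB, pvSegs]
  | cons c r ih =>
    intro w buf found
    have hc : ¬ c = ']' := fun he => hv (by simp [he])
    have hr : ']' ∉ r := fun hm => hv (List.mem_cons_of_mem _ hm)
    by_cases hcm : c = ','
    · subst hcm
      simp only [List.cons_append, pvScanB, hc, pvSegs]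
      norm_num
      rw [ih hr w [] (found ++ [buf])]
      simp
    · simp only [List.cons_append, pvScanB, hc, hcm, pvSegs]
      norm_num
      rw [ih hr w (buf ++ [c]) found]

theorem segs_go (v : List Char) :
    ∀ (fuel : Nat), v.length < fuel → ∀ (cur : List Char) (acc : List (List Char)),
      PySem.Chars.splitOn.go [','] fuel v cur acc =
        acc.reverse ++ (pvSegs cur.reverse v).1 ++ [(pvSegs cur.reverse v).2] := by
  induction v with
  | nil =>
    intro fuel hf cur acc
    cases fuel with
    | zero => omega
    | succ f => simp [PySem.Chars.splitOn.go, pvSegs]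
  | cons c r ih =>
    intro fuel hf cur acc
    cases fuel with
    | zero => omega
    | succ f =>
      have hf' : r.length < f := by simpa using hf
      by_cases hcm : c = ','
      · subst hcm
        have hp : [','].isPrefixOf (',' :: r) = true := by simp [List.isPrefixOf]
        simp only [PySem.Chars.splitOn.go, hp, if_pos]
        rw [show List.drop [','].length (',' :: r) = r from rfl]
        rw [ih f hf' [] (cur.reverse :: acc)]
        simp [pvSegs]
      · have hp : [','].isPrefixOf (c :: r) = false := by
          simp [List.isPrefixOf]; intro h'; exact absurd h'.symm hcm
        simp only [PySem.Chars.splitOn.go, hp, Bool.false_eq_true, if_neg, not_false_iff]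
        rw [ih f hf' (c :: cur) acc]
        simp [pvSegs, hcm]

theorem segs_splitOn (v : List Char) :
    (pvSegs [] v).1 ++ [(pvSegs [] v).2] = PySem.Chars.splitOn v [','] := by
  rw [PySem.Chars.splitOn, segs_go v (v.length + 1) (by omega) [] []]
  simp

theorem mem_take_prefix (u : List Char) (n : Nat) (c : Char) (h : c ∈ u.take n) :
    ∃ i < n, [c] <+: u.drop i := by
  obtain ⟨i, hi, he⟩ := List.mem_iff_getElem.mp h
  have hin : i < n := lt_of_lt_of_le hi (by simp)
  have hiu : i < u.length := by
    have := hi; simp at this; omega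
  have he' : u[i] = c := by rw [← he]; symm; exact List.getElem_take
  have hd := List.drop_eq_getElem_cons (l := u) hiu
  rw [he'] at hd
  exact ⟨i, hin, u.drop (i + 1), by rw [List.singleton_append, hd]⟩

theorem pv_step_eq (ops : List String) (line : String) : pvStepA ops line = pvStepB ops line := by
  have hcR : ∀ x, (PySem.Chars.lowerChar x = ']') ↔ x = ']' :=
    fun x => lowerChar_eq_iff x ']' (by decide) (by decide)
  set s := line.toList with hs
  rw [pvStepA, pvStepB]
  simp only [show "[ops:".toList = ['[','o','p','s',':'] from rfl,
    show "]".toList = [']'] from rfl, show ",".toList = [','] from rfl]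
  set L := PySem.Chars.lower s with hL
  have hLm : L = s.map PySem.Chars.lowerChar := rfl
  by_cases hin : PySem.Chars.isIn ['[','o','p','s',':'] L = false
  · have hni : ¬ ['[','o','p','s',':'] <:+: L := (PySem.Chars.isIn_eq_false_iff _ _).mp hin
    rw [if_pos hin]
    rw [scan_no_marker L [] [] hni]
    simp
  · have hin' : PySem.Chars.isIn ['[','o','p','s',':'] L = true := by
      cases h : PySem.Chars.isIn ['[','o','p','s',':'] L
      · exact absurd h hin
      · rfl
    have hinf : ['[','o','p','s',':'] <:+: L := (PySem.Chars.isIn_iff_infix _ _).mp hin'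
    have hge : 0 ≤ PySem.Chars.find L ['[','o','p','s',':'] :=
      (PySem.Chars.find_nonneg_iff _ _).mpr hinf
    set st := PySem.Chars.find L ['[','o','p','s',':'] with hst
    have hk : st = ((st.toNat : Nat) : Int) := (Int.toNat_of_nonneg hge).symm
    set k := st.toNat with hkdef
    have hspec := PySem.Chars.find_spec (s := L) (sub := ['[','o','p','s',':']) hge
    have hLlen : L.length = s.length := by rw [hLm]; simp
    have hkle : k ≤ s.length := by
      have h1 := PySem.Chars.find_le_length L ['[','o','p','s',':']
      rw [← hst, hLlen] at h1
      omega
    -- B's scan jumps to the body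
    have hscan : pvScanB ['[','o','p','s',':'] 0 [] [] L =
        pvScanB ['[','o','p','s',':'] 5 [] [] (L.drop (k + 5)) :=
      scan_search k L [] [] hspec.2 hspec.1
    obtain ⟨r, hr⟩ := hspec.1
    have hrdrop : L.drop (k+5) = r := by
      have h1 : (L.drop k).drop 5 = r := by rw [← hr]; simp
      rw [← h1, List.drop_drop]
    have hdk : L.drop k = ['[','o','p','s',':'] ++ L.drop (k+5) := by
      rw [hrdrop, ← hr]
    set tl := L.drop (k+5) with htl
    set j := PySem.Chars.find tl [']'] with hj
    have hjge : -1 ≤ j := PySem.Chars.neg_one_le_find _ _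
    have hsmap : L.drop k = (s.drop k).map PySem.Chars.lowerChar := by
      rw [hLm, List.map_drop]
    have hfs : PySem.Chars.find (s.drop k) [']'] = if j = -1 then -1 else 5 + j := by
      rw [← find_map_lower ']' hcR (s.drop k), ← hsmap, hdk,
        find_single_append _ _ _ (by decide)]
      rw [← hj]
      norm_num
    have hstop : PySem.Chars.findFrom s [']'] st = if j = -1 then -1 else (k : Int) + (5 + j) := by
      rw [hk, PySem.Chars.findFrom_natCast s [']'] k hkle, hfs]
      by_cases h0 : j = -1
      · simp [h0]
      · simp [h0]
        intro hc
        omega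
    have hstne : ¬ st = -1 := by omega
    by_cases hj1 : j = -1
    · -- no closing bracket: both sides return ops
      have hsA : PySem.Chars.findFrom s [']'] st = -1 := by rw [hstop, if_pos hj1]
      have hnomem : ']' ∉ tl := by
        have hni := (PySem.Chars.find_eq_neg_one_iff tl [']']).mp (hj ▸ hj1)
        intro hm
        obtain ⟨i, hilt, he⟩ := List.mem_iff_getElem.mp hm
        have hd := List.drop_eq_getElem_cons (l := tl) hilt
        rw [he] at hd
        exact hni ⟨tl.take i, tl.drop (i+1), by
          rw [List.append_assoc, List.singleton_append, ← hd, List.take_append_drop]⟩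
      rw [if_neg (by simp [hin]), if_pos (Or.inr hsA), hscan]
      rw [if_neg (by simp [scan_collect_no_close tl [] [] hnomem])]
    · -- closing bracket found
      have hjge0 : 0 ≤ j := by omega
      have hjn : j = ((j.toNat : Nat) : Int) := (Int.toNat_of_nonneg hjge0).symm
      have hjspec := PySem.Chars.find_spec (s := tl) (sub := [']']) hjge0
      have hsA : PySem.Chars.findFrom s [']'] st = (k : Int) + (5 + j) := by
        rw [hstop, if_neg hj1]
      have hAcond : ¬ (st = -1 ∨ PySem.Chars.findFrom s [']'] st = -1) := by
        rw [hsA]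
        rintro (h | h) <;> omega
      -- decompose tl = v ++ ']' :: w
      set jn := j.toNat with hjndef
      set v := tl.take jn with hv
      set w := tl.drop (jn + 1) with hw
      obtain ⟨r2, hr2⟩ := hjspec.1
      have htl2 : tl = v ++ ']' :: w := by
        have h2 : tl.drop jn = ']' :: r2 := by rw [← hr2]; rfl
        have h3 : tl.drop (jn + 1) = r2 := by
          have := congrArg (List.drop 1) h2
          simpa [List.drop_drop, Nat.add_comm] using this
        have h1 : tl.drop jn = ']' :: w := by rw [hw, h3]; exact h2
        rw [← List.take_append_drop jn tl, h1]
      have hvno : ']' ∉ v := by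
        intro hm
        obtain ⟨i, hilt, hp⟩ := mem_take_prefix tl jn ']' (hv ▸ hm)
        exact hjspec.2 i hilt hp
      -- A's raw slice is the (un-lowered) body
      have hslice : PySem.List.slice s (some (st + 5)) (some (PySem.Chars.findFrom s [']'] st)) =
          (s.drop (k + 5)).take jn := by
        rw [hsA, hk]
        have h1 : ((k : Int) : Int) + 5 = ((k + 5 : Nat) : Int) := by push_cast; ring
        have h2 : (k : Int) + (5 + j) = ((k + 5 + jn : Nat) : Int) := by
          rw [hjndef]; omega
        rw [h1, h2, PySem.List.slice_natCast]
        congr 1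
        omega
      have hbody : v = ((s.drop (k + 5)).take jn).map PySem.Chars.lowerChar := by
        rw [hv, htl, hLm]
        simp [List.map_take, List.map_drop]
      rw [if_neg (by simp [hin]), if_neg hAcond, hscan, htl2,
        scan_collect v hvno w [] []]
      simp only [List.nil_append, if_pos]
      rw [hslice, segs_splitOn v, hbody]
      exact congrArg (ops ++ ·) (tail_lists_eq _)

-- ===== VERDICT (by name: the statement is the Claim_ definition above) =====
theorem extract_ops_from_core_py_spec : Claim_equal_extract_ops_from_core_py := by
  unfold Claim_equal_extract_ops_from_core_py
  intro core_logic _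
  unfold Spec_extract_ops_from_core_py extract_ops_from_core_py extract_ops_from_core_py_alt
  exact PySem.List.foldl_congr_mem core_logic pvStepA pvStepB []
    (fun acc x _ => pv_step_eq acc x)
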